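-- pv_equiv track=rewrite | github.com/lepture/mistune | mistune/plugins/toc.py | render_toc_ul
-- ===== SOURCE A (Python) =====
-- def render_toc_ul(toc):
--     """Render a <ul> table of content HTML. The param "toc" should
--     be formatted into this structure::
--
--         [
--           (toc_id, text, level),
--         ]
--
--     For example::
--
--         [
--           ('toc-intro', 'Introduction', 1),
--           ('toc-install', 'Install', 2),
--           ('toc-upgrade', 'Upgrade', 2),
--           ('toc-license', 'License', 1),
--         ]
--     """
--     if not toc:
--         return ''
--
--     s = '<ul>\n'
--     levels = []
--     for k, text, level in toc:
--         item = '<a href="#{}">{}</a>'.format(k, text)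
--         if not levels:
--             s += '<li>' + item
--             levels.append(level)
--         elif level == levels[-1]:
--             s += '</li>\n<li>' + item
--         elif level > levels[-1]:
--             s += '\n<ul>\n<li>' + item
--             levels.append(level)
--         else:
--             last_level = levels.pop()
--             while levels:
--                 last_level = levels.pop()
--                 if level == last_level:
--                     s += '</li>\n</ul>\n</li>\n<li>' + item
--                     levels.append(level)
--                     break
--                 elif level > last_level:
--                     s += '</li>\n<li>' + item
--                     levels.append(last_level)
--                     levels.append(level)
--                     break
--                 else:
--                     s += '</li>\n</ul>\n'
--             else:
--                 levels.append(level)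
--                 s += '</li>\n<li>' + item
--
--     while len(levels) > 1:
--         s += '</li>\n</ul>\n'
--         levels.pop()
--
--     return s + '</li>\n</ul>\n'
-- ===== SOURCE B (Python) =====
-- def _render_node(node):
--     k, text, children = node
--     s = '<li><a href="#{}">{}</a>'.format(k, text)
--     if children:
--         s += '\n<ul>\n' + _render_list(children) + '</li>\n</ul>\n'
--     return s
--
--
-- def _render_list(nodes):
--     return '</li>\n'.join(_render_node(n) for n in nodes)
--
--
-- def render_toc_ul(toc):
--     if not toc:
--         return ''
--     roots = []
--     stack = []  # entries: [k, text, level, children]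
--     for k, text, level in toc:
--         while stack and stack[-1][2] >= level:
--             k2, t2, _, cs = stack.pop()
--             node = (k2, t2, cs)
--             if stack:
--                 stack[-1][3].append(node)
--             else:
--                 roots.append(node)
--         stack.append([k, text, level, []])
--     while stack:
--         k2, t2, _, cs = stack.pop()
--         node = (k2, t2, cs)
--         if stack:
--             stack[-1][3].append(node)
--         else:
--             roots.append(node)
--     return '<ul>\n' + _render_list(roots) + '</li>\n</ul>\n'
-- ===== Notes on version B (the rewrite author's own statement) =====
-- stated objective: alternative
-- what changed: A emits HTML incrementally from a stack of levels with an inner pop-loop deciding which closing tags to interleave; B first parses the flat entry list into a forest using a stack of open nodes, then renders that forest with a recursive sibling-join renderer.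
import Mathlib
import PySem

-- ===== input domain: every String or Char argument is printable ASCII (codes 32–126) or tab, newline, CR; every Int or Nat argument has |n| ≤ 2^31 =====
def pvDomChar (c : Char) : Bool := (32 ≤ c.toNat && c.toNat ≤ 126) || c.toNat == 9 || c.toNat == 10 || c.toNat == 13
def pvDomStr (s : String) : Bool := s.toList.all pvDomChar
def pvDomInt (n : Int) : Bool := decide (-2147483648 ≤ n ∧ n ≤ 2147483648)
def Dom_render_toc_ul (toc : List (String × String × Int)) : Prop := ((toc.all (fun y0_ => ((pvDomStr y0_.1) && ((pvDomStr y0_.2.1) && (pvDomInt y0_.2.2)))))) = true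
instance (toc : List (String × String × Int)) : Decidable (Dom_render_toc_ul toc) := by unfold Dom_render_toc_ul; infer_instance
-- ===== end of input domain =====

-- B re-implements A by first parsing the flat (id, text, level) list into a forest with a
-- stack of open nodes and then rendering that forest recursively; A instead emits the HTML
-- incrementally from a stack of levels.  Objective: alternative algorithm, same exact output.

-- ===== PORT A =====
-- the inner `while levels:` pop-loop of A (entered after the first silent pop)
def pvAInner (s : String) (item : String) (level : Int) (levels : List Int) : String × List Int :=
  match levels with
  | [] => (s ++ "</li>\n<li>" ++ item, [level])                      -- for-else: no break
  | last :: rest =>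
    if level = last then (s ++ "</li>\n</ul>\n</li>\n<li>" ++ item, level :: rest)
    else if level > last then (s ++ "</li>\n<li>" ++ item, level :: last :: rest)
    else pvAInner (s ++ "</li>\n</ul>\n") item level rest

-- one iteration of A's main `for k, text, level in toc:` loop; levels kept top-at-head
def pvAStep (st : String × List Int) (e : String × String × Int) : String × List Int :=
  let item := "<a href=\"#" ++ e.1 ++ "\">" ++ e.2.1 ++ "</a>"
  match st.2 with
  | [] => (st.1 ++ "<li>" ++ item, [e.2.2])
  | top :: rest =>
    if e.2.2 = top then (st.1 ++ "</li>\n<li>" ++ item, top :: rest)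
    else if e.2.2 > top then (st.1 ++ "\n<ul>\n<li>" ++ item, e.2.2 :: top :: rest)
    else pvAInner st.1 item e.2.2 rest                               -- first pop discards top

-- A's trailing `while len(levels) > 1:` plus the final closing
def pvAClose (s : String) (levels : List Int) : String :=
  match levels with
  | _ :: b :: rest => pvAClose (s ++ "</li>\n</ul>\n") (b :: rest)
  | _ => s ++ "</li>\n</ul>\n"

def render_toc_ul (toc : List (String × String × Int)) : String :=
  if toc = [] then ""
  else
    let st := toc.foldl pvAStep ("<ul>\n", ([] : List Int))
    pvAClose st.1 st.2

-- ===== PORT B =====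
mutual
inductive PvNode where
  | mk : String → String → PvNodeList → PvNode
inductive PvNodeList where
  | nil : PvNodeList
  | cons : PvNode → PvNodeList → PvNodeList
end

def PvNodeList.append : PvNodeList → PvNodeList → PvNodeList
  | .nil, ys => ys
  | .cons x xs, ys => .cons x (xs.append ys)

mutual
-- Source B _render_node: '<li><a …>' plus, when there are children, an inner '<ul>' block
def pvRenderNode : PvNode → String
  | .mk k t .nil => "<li><a href=\"#" ++ k ++ "\">" ++ t ++ "</a>"
  | .mk k t (.cons n ns) =>
      "<li><a href=\"#" ++ k ++ "\">" ++ t ++ "</a>" ++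
        ("\n<ul>\n" ++ pvRenderList (.cons n ns) ++ "</li>\n</ul>\n")
-- Source B _render_list: '</li>\n'.join of the rendered nodes
def pvRenderList : PvNodeList → String
  | .nil => ""
  | .cons n .nil => pvRenderNode n
  | .cons n (.cons m ms) => pvRenderNode n ++ "</li>\n" ++ pvRenderList (.cons m ms)
end

-- a stack entry of Source B: (id, text, level, children collected so far)
abbrev PvFrame : Type := String × String × Int × PvNodeList

-- Source B's `while stack and stack[-1][2] >= level:` pop-loop (stack kept top-at-head)
def pvPopGE (roots : PvNodeList) (frames : List PvFrame) (level : Int) : PvNodeList × List PvFrame :=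
  match frames with
  | [] => (roots, [])
  | (k, t, lv, cs) :: rest =>
    if lv ≥ level then
      match rest with
      | [] => pvPopGE (roots.append (.cons (.mk k t cs) .nil)) [] level
      | (k2, t2, lv2, cs2) :: r2 =>
          pvPopGE roots ((k2, t2, lv2, cs2.append (.cons (.mk k t cs) .nil)) :: r2) level
    else (roots, (k, t, lv, cs) :: rest)
termination_by frames.length
decreasing_by all_goals simp

-- one iteration of Source B's main loop: pop, then push a fresh open node
def pvBStep (st : PvNodeList × List PvFrame) (e : String × String × Int) : PvNodeList × List PvFrame :=
  let p := pvPopGE st.1 st.2 e.2.2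
  (p.1, (e.1, e.2.1, e.2.2, PvNodeList.nil) :: p.2)

-- Source B's final `while stack:` loop
def pvPopAll (roots : PvNodeList) (frames : List PvFrame) : PvNodeList :=
  match frames with
  | [] => roots
  | (k, t, _, cs) :: rest =>
    match rest with
    | [] => roots.append (.cons (.mk k t cs) .nil)
    | (k2, t2, lv2, cs2) :: r2 =>
        pvPopAll roots ((k2, t2, lv2, cs2.append (.cons (.mk k t cs) .nil)) :: r2)
termination_by frames.length
decreasing_by all_goals simp

def render_toc_ul_alt (toc : List (String × String × Int)) : String :=
  if toc = [] then ""
  else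
    let st := toc.foldl pvBStep (PvNodeList.nil, ([] : List PvFrame))
    "<ul>\n" ++ pvRenderList (pvPopAll st.1 st.2) ++ "</li>\n</ul>\n"

-- ===== PRECONDITION & SPEC =====
def Spec_render_toc_ul (toc : List (String × String × Int)) (out : String) : Prop := out = render_toc_ul_alt toc
instance (toc : List (String × String × Int)) (out : String) : Decidable (Spec_render_toc_ul toc out) := by unfold Spec_render_toc_ul; infer_instance

-- ===== CLAIM (what is proved, stated in full; the proofs are below) =====
def Claim_equal_render_toc_ul : Prop := ∀ (toc : List (String × String × Int)), Dom_render_toc_ul toc → Spec_render_toc_ul toc (render_toc_ul toc)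

-- ===== LEMMAS AND PROOFS =====

-- projections of a frame
def pvLv (f : PvFrame) : Int := f.2.2.1
def pvDone (f : PvFrame) : PvNodeList := f.2.2.2

-- rendered sibling list followed by a separator (empty for no siblings)
def pvJoinAfter : PvNodeList → String
  | .nil => ""
  | .cons n ns => pvRenderList (.cons n ns) ++ "</li>\n"

-- text contributed by one still-open frame: optional '\n<ul>\n' opener (iff it has a parent),
-- its already-finished siblings, and its own '<li><a …>'
def pvContrib (f : PvFrame) (sib : PvNodeList) (hp : Bool) : String :=
  (if hp then "\n<ul>\n" else "") ++ pvJoinAfter sib ++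
    ("<li><a href=\"#" ++ f.1 ++ "\">" ++ f.2.1 ++ "</a>")

-- siblings of the bottom-most relevant frame: parent's children, or the finished roots
def pvSib (roots : PvNodeList) : List PvFrame → PvNodeList
  | [] => roots
  | g :: _ => pvDone g

-- the HTML text A has emitted (after the leading '<ul>\n') in the state (roots, frames)
def pvT (roots : PvNodeList) : List PvFrame → String
  | [] => ""
  | f :: rest => pvT roots rest ++ pvContrib f (pvSib roots rest) (!rest.isEmpty)

-- fully closed child block of a node
def pvCPend : PvNodeList → String
  | .nil => ""
  | .cons n ns => "\n<ul>\n" ++ pvRenderList (.cons n ns) ++ "</li>\n</ul>\n"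

lemma pvRenderNode_eq (k t : String) (cs : PvNodeList) :
    pvRenderNode (.mk k t cs) = "<li><a href=\"#" ++ k ++ "\">" ++ t ++ "</a>" ++ pvCPend cs := by
  cases cs <;> simp [pvRenderNode, pvCPend]

lemma pvRenderList_append_one : ∀ (cs : PvNodeList) (n : PvNode),
    pvRenderList (cs.append (.cons n .nil)) = pvJoinAfter cs ++ pvRenderNode n
  | .nil, n => by simp [PvNodeList.append, pvRenderList, pvJoinAfter]
  | .cons m .nil, n => by
      simp [PvNodeList.append, pvRenderList, pvJoinAfter, String.append_assoc]
  | .cons m (.cons m2 ms2), n => by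
      have ih := pvRenderList_append_one (.cons m2 ms2) n
      simp only [PvNodeList.append] at ih ⊢
      rw [show pvRenderList (.cons m (.cons m2 (PvNodeList.append ms2 (.cons n .nil))))
            = pvRenderNode m ++ "</li>\n" ++ pvRenderList (.cons m2 (PvNodeList.append ms2 (.cons n .nil))) from rfl]
      rw [ih]
      simp [pvJoinAfter, pvRenderList, String.append_assoc]

lemma pvJoinAfter_append_one (cs : PvNodeList) (n : PvNode) :
    pvJoinAfter (cs.append (.cons n .nil)) = pvJoinAfter cs ++ pvRenderNode n ++ "</li>\n" := by
  have h := pvRenderList_append_one cs n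
  cases cs with
  | nil => simp [PvNodeList.append, pvJoinAfter, pvRenderList]
  | cons m ms =>
      simp only [PvNodeList.append] at h ⊢
      simp [pvJoinAfter, h, String.append_assoc]

lemma pvCPend_append_one (cs : PvNodeList) (n : PvNode) :
    pvCPend (cs.append (.cons n .nil)) = "\n<ul>\n" ++ pvJoinAfter cs ++ pvRenderNode n ++ "</li>\n</ul>\n" := by
  have h := pvRenderList_append_one cs n
  cases cs with
  | nil => simp [PvNodeList.append, pvCPend, pvJoinAfter, pvRenderList]
  | cons m ms =>
      simp only [PvNodeList.append] at h ⊢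
      simp [pvCPend, h, String.append_assoc]

-- reduction lemmas for the ports' loops
lemma pvPopGE_nil (roots : PvNodeList) (level : Int) : pvPopGE roots [] level = (roots, []) := by
  rw [pvPopGE.eq_def]

lemma pvPopGE_stop (roots : PvNodeList) (k t : String) (lv : Int) (cs : PvNodeList)
    (rest : List PvFrame) (level : Int) (h : ¬ lv ≥ level) :
    pvPopGE roots ((k, t, lv, cs) :: rest) level = (roots, (k, t, lv, cs) :: rest) := by
  rw [pvPopGE.eq_def]; simp [h]

lemma pvPopGE_pop_last (roots : PvNodeList) (k t : String) (lv : Int) (cs : PvNodeList)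
    (level : Int) (h : lv ≥ level) :
    pvPopGE roots [(k, t, lv, cs)] level = (roots.append (.cons (.mk k t cs) .nil), []) := by
  rw [pvPopGE]; simp [h, pvPopGE]

lemma pvPopGE_pop (roots : PvNodeList) (k t : String) (lv : Int) (cs : PvNodeList)
    (k2 t2 : String) (lv2 : Int) (cs2 : PvNodeList) (r2 : List PvFrame) (level : Int)
    (h : lv ≥ level) :
    pvPopGE roots ((k, t, lv, cs) :: (k2, t2, lv2, cs2) :: r2) level
      = pvPopGE roots ((k2, t2, lv2, cs2.append (.cons (.mk k t cs) .nil)) :: r2) level := by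
  rw [pvPopGE]; simp [h]

lemma pvPopAll_last (roots : PvNodeList) (k t : String) (lv : Int) (cs : PvNodeList) :
    pvPopAll roots [(k, t, lv, cs)] = roots.append (.cons (.mk k t cs) .nil) := by
  rw [pvPopAll]

lemma pvPopAll_pop (roots : PvNodeList) (k t : String) (lv : Int) (cs : PvNodeList)
    (k2 t2 : String) (lv2 : Int) (cs2 : PvNodeList) (r2 : List PvFrame) :
    pvPopAll roots ((k, t, lv, cs) :: (k2, t2, lv2, cs2) :: r2)
      = pvPopAll roots ((k2, t2, lv2, cs2.append (.cons (.mk k t cs) .nil)) :: r2) := by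
  rw [pvPopAll]

-- the full invariant tying A's (string, levels) to B's (roots, stack)
def pvInv (st : String × List Int) (roots : PvNodeList) (frames : List PvFrame) : Prop :=
  st.2 = frames.map pvLv
  ∧ st.1 = "<ul>\n" ++ pvT roots frames
  ∧ (∀ f rest, frames = f :: rest → pvDone f = .nil)
  ∧ (frames = [] → roots = .nil)
  ∧ List.IsChain (fun a b => b < a) (frames.map pvLv)

lemma pvLoop (gs : List PvFrame) : ∀ (g : PvFrame) (roots : PvNodeList) (k t : String) (level : Int),
    pvDone g ≠ .nil →
    List.IsChain (fun a b => b < a) ((g :: gs).map pvLv) →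
    (pvAInner ("<ul>\n" ++ pvT roots (g :: gs) ++ "\n<ul>\n" ++ pvRenderList (pvDone g))
        ("<a href=\"#" ++ k ++ "\">" ++ t ++ "</a>") level ((g :: gs).map pvLv)).1
        = "<ul>\n" ++ pvT (pvPopGE roots (g :: gs) level).1
            ((k, t, level, PvNodeList.nil) :: (pvPopGE roots (g :: gs) level).2)
    ∧ (pvAInner ("<ul>\n" ++ pvT roots (g :: gs) ++ "\n<ul>\n" ++ pvRenderList (pvDone g))
        ("<a href=\"#" ++ k ++ "\">" ++ t ++ "</a>") level ((g :: gs).map pvLv)).2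
        = (((k, t, level, PvNodeList.nil) : PvFrame) :: (pvPopGE roots (g :: gs) level).2).map pvLv
    ∧ List.IsChain (fun a b => b < a)
        ((((k, t, level, PvNodeList.nil) : PvFrame) :: (pvPopGE roots (g :: gs) level).2).map pvLv) := by
  induction gs with
  | nil =>
      intro g roots k t level hdone hchain
      obtain ⟨gk, gt, glv, gcs⟩ := g
      simp only [pvDone] at hdone
      obtain ⟨n, ns, rfl⟩ : ∃ n ns, gcs = PvNodeList.cons n ns := by
        cases gcs with
        | nil => exact absurd rfl hdone
        | cons a b => exact ⟨a, b, rfl⟩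
      by_cases h1 : level = glv
      · subst h1
        rw [pvPopGE_pop_last _ _ _ _ _ _ (le_refl level)]
        simp only [List.map, pvLv, pvDone, pvAInner, if_pos rfl]
        refine ⟨?_, by simp [pvLv], by simp⟩
        apply String.toList_inj.mp
        simp [pvT, pvContrib, pvSib, pvJoinAfter_append_one, pvRenderNode_eq, pvCPend,
          pvDone, String.toList_append, String.append_assoc]
      · by_cases h2 : level > glv
        · rw [pvPopGE_stop _ _ _ _ _ _ _ (by omega)]
          simp only [List.map, pvLv, pvDone, pvAInner, if_neg h1, if_pos h2]
          refine ⟨?_, by simp [pvLv], by simp [List.isChain_cons_cons, pvLv]; omega⟩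
          apply String.toList_inj.mp
          simp [pvT, pvContrib, pvSib, pvJoinAfter, pvDone, String.toList_append, String.append_assoc]
        · have h3 : level < glv := by omega
          rw [pvPopGE_pop_last _ _ _ _ _ _ (by omega)]
          simp only [List.map, pvLv, pvDone, pvAInner, if_neg h1, if_neg (by omega : ¬ level > glv)]
          refine ⟨?_, by simp [pvLv], by simp⟩
          apply String.toList_inj.mp
          simp [pvT, pvContrib, pvSib, pvJoinAfter_append_one, pvRenderNode_eq, pvCPend,
            pvDone, String.toList_append, String.append_assoc]
  | cons h tl ih =>
      intro g roots k t level hdone hchain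
      obtain ⟨gk, gt, glv, gcs⟩ := g
      obtain ⟨hk, ht, hlv, hcs⟩ := h
      simp only [pvDone] at hdone
      obtain ⟨n, ns, rfl⟩ : ∃ n ns, gcs = PvNodeList.cons n ns := by
        cases gcs with
        | nil => exact absurd rfl hdone
        | cons a b => exact ⟨a, b, rfl⟩
      have hlt : hlv < glv := by
        simp [List.isChain_cons_cons, pvLv] at hchain; exact hchain.1
      have hchain' : List.IsChain (fun a b => b < a)
          ((((hk, ht, hlv, hcs) : PvFrame) :: tl).map pvLv) := by
        simp only [List.map] at hchain ⊢
        exact (List.isChain_cons_cons.mp hchain).2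
      by_cases h1 : level = glv
      · subst h1
        rw [pvPopGE_pop _ _ _ _ _ _ _ _ _ _ _ (le_refl level),
            pvPopGE_stop _ _ _ _ _ _ _ (by omega)]
        simp only [List.map, pvLv, pvDone, pvAInner, if_pos rfl]
        refine ⟨?_, by simp [pvLv], ?_⟩
        · apply String.toList_inj.mp
          simp [pvT, pvContrib, pvSib, pvJoinAfter_append_one, pvRenderNode_eq, pvCPend,
            pvDone, String.toList_append, String.append_assoc]
        · simp only [List.map, pvLv, List.isChain_cons_cons] at hchain' ⊢
          exact ⟨hlt, hchain'⟩
      · by_cases h2 : level > glv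
        · rw [pvPopGE_stop _ _ _ _ _ _ _ (by omega)]
          simp only [List.map, pvLv, pvDone, pvAInner, if_neg h1, if_pos h2]
          refine ⟨?_, by simp [pvLv], ?_⟩
          · apply String.toList_inj.mp
            simp [pvT, pvContrib, pvSib, pvJoinAfter, pvDone, String.toList_append, String.append_assoc]
          · simp only [List.map, pvLv, List.isChain_cons_cons] at hchain ⊢
            exact ⟨h2, hchain⟩
        · have h3 : level < glv := by omega
          rw [pvPopGE_pop _ _ _ _ _ _ _ _ _ _ _ (by omega)]
          simp only [List.map, pvLv, pvDone, pvAInner, if_neg h1, if_neg (by omega : ¬ level > glv)]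
          have hd' : pvDone ((hk, ht, hlv, hcs.append (.cons (.mk gk gt (.cons n ns)) .nil)) : PvFrame) ≠ .nil := by
            cases hcs <;> simp [pvDone, PvNodeList.append]
          have hc' : List.IsChain (fun a b => b < a)
              ((((hk, ht, hlv, hcs.append (.cons (.mk gk gt (.cons n ns)) .nil)) : PvFrame) :: tl).map pvLv) := by
            simpa [pvLv] using hchain'
          have heq : ("<ul>\n" ++ pvT roots ((gk, gt, glv, PvNodeList.cons n ns) :: (hk, ht, hlv, hcs) :: tl)
                ++ "\n<ul>\n" ++ pvRenderList (PvNodeList.cons n ns) ++ "</li>\n</ul>\n" : String)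
              = "<ul>\n" ++ pvT roots (((hk, ht, hlv, hcs.append (.cons (.mk gk gt (.cons n ns)) .nil)) : PvFrame) :: tl)
                ++ "\n<ul>\n" ++ pvRenderList (pvDone ((hk, ht, hlv, hcs.append (.cons (.mk gk gt (.cons n ns)) .nil)) : PvFrame)) := by
            apply String.toList_inj.mp
            cases tl with
            | nil =>
                simp [pvT, pvContrib, pvSib, pvDone, pvRenderList_append_one, pvRenderNode_eq,
                  pvCPend, pvJoinAfter, String.toList_append, String.append_assoc]
            | cons x xs =>
                simp [pvT, pvContrib, pvSib, pvDone, pvRenderList_append_one, pvRenderNode_eq,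
                  pvCPend, pvJoinAfter, String.toList_append, String.append_assoc]
          have := ih ((hk, ht, hlv, hcs.append (.cons (.mk gk gt (.cons n ns)) .nil)) : PvFrame)
            roots k t level hd' hc'
          simp only [List.map, pvLv, pvDone] at this
          rw [show (pvT roots ((gk, gt, glv, PvNodeList.cons n ns) :: (hk, ht, hlv, hcs) :: tl)) =
              pvT roots ((gk, gt, glv, PvNodeList.cons n ns) :: (hk, ht, hlv, hcs) :: tl) from rfl]
          -- align the accumulator string with the one the IH speaks about
          have harg : ("<ul>\n" ++ pvT roots ((gk, gt, glv, PvNodeList.cons n ns) :: (hk, ht, hlv, hcs) :: tl)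
                ++ "\n<ul>\n" ++ pvRenderList (PvNodeList.cons n ns) ++ "</li>\n</ul>\n" : String)
              = "<ul>\n" ++ pvT roots (((hk, ht, hlv, hcs.append (.cons (.mk gk gt (.cons n ns)) .nil)) : PvFrame) :: tl)
                ++ "\n<ul>\n" ++ pvRenderList (hcs.append (.cons (.mk gk gt (.cons n ns)) .nil)) := by
            simpa [pvDone] using heq
          rw [show ("<ul>\n" ++ pvT roots ((gk, gt, glv, PvNodeList.cons n ns) :: (hk, ht, hlv, hcs) :: tl)
              ++ "\n<ul>\n" ++ pvRenderList (PvNodeList.cons n ns) ++ "</li>\n</ul>\n" : String)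
              = "<ul>\n" ++ pvT roots (((hk, ht, hlv, hcs.append (.cons (.mk gk gt (.cons n ns)) .nil)) : PvFrame) :: tl)
              ++ "\n<ul>\n" ++ pvRenderList (hcs.append (.cons (.mk gk gt (.cons n ns)) .nil)) from harg] at *
          exact this

lemma pvStepLemma (st : String × List Int) (roots : PvNodeList) (frames : List PvFrame)
    (e : String × String × Int) (h : pvInv st roots frames) :
    pvInv (pvAStep st e) (pvBStep (roots, frames) e).1 (pvBStep (roots, frames) e).2 := by
  obtain ⟨s, lvls⟩ := st
  obtain ⟨k, t, level⟩ := e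
  obtain ⟨hlv, hs, htop, hroots, hchain⟩ := h
  simp only at hlv hs
  subst hlv hs
  cases frames with
  | nil =>
      have hr : roots = .nil := hroots rfl
      subst hr
      refine ⟨?_, ?_, ?_, ?_, ?_⟩
      · simp [pvAStep, pvBStep, pvPopGE_nil, pvLv]
      · simp only [pvAStep, pvBStep, pvPopGE_nil]
        apply String.toList_inj.mp
        simp [pvT, pvContrib, pvSib, pvJoinAfter, String.toList_append, String.append_assoc]
      · intro f rest hf
        simp only [pvBStep, pvPopGE_nil] at hf
        cases hf; rfl
      · simp [pvBStep]
      · simp [pvBStep, pvPopGE_nil]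
  | cons f rest =>
      obtain ⟨fk, ft, flv, fcs⟩ := f
      have hfnil : fcs = .nil := htop _ _ rfl
      subst hfnil
      by_cases h1 : level = flv
      · -- level == levels[-1]
        subst h1
        cases rest with
        | nil =>
            have hred : pvBStep (roots, [((fk, ft, level, PvNodeList.nil) : PvFrame)]) (k, t, level)
                = (roots.append (.cons (.mk fk ft .nil) .nil), [((k, t, level, PvNodeList.nil) : PvFrame)]) := by
              simp only [pvBStep]
              rw [pvPopGE_pop_last roots fk ft level PvNodeList.nil level (le_refl level)]
            rw [hred]
            refine ⟨?_, ?_, ?_, ?_, ?_⟩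
            · simp [pvAStep, pvLv]
            · simp only [pvAStep, List.map_cons, List.map_nil, pvLv, if_true]
              apply String.toList_inj.mp
              simp [pvT, pvContrib, pvSib, pvDone, pvJoinAfter_append_one, pvRenderNode_eq,
                pvCPend, String.toList_append, String.append_assoc]
            · intro f' rest' hf'; cases hf'; rfl
            · simp
            · simp only [List.map_cons, List.map_nil]
              exact List.IsChain.singleton _
        | cons g gs =>
            obtain ⟨gk, gt, glv, gcs⟩ := g
            have hglt : glv < level := by
              simp only [List.map_cons, List.isChain_cons_cons, pvLv] at hchain
              exact hchain.1
            have hred : pvBStep (roots, (fk, ft, level, PvNodeList.nil) :: (gk, gt, glv, gcs) :: gs) (k, t, level)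
                = ((roots, ((gk, gt, glv, gcs.append (.cons (.mk fk ft .nil) .nil)) : PvFrame) :: gs).1,
                   ((k, t, level, PvNodeList.nil) : PvFrame) :: (gk, gt, glv, gcs.append (.cons (.mk fk ft .nil) .nil)) :: gs) := by
              simp only [pvBStep]
              rw [pvPopGE_pop roots fk ft level PvNodeList.nil gk gt glv gcs gs level (le_refl level),
                pvPopGE_stop roots gk gt glv (gcs.append (.cons (.mk fk ft .nil) .nil)) gs level (by omega)]
            rw [hred]
            refine ⟨?_, ?_, ?_, ?_, ?_⟩
            · simp [pvAStep, pvLv]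
            · simp only [pvAStep, List.map_cons, pvLv, if_true]
              apply String.toList_inj.mp
              simp [pvT, pvContrib, pvSib, pvDone, pvJoinAfter_append_one, pvRenderNode_eq,
                pvCPend, String.toList_append, String.append_assoc]
            · intro f' rest' hf'; cases hf'; rfl
            · simp
            · simp only [List.map_cons, List.isChain_cons_cons, pvLv] at hchain ⊢
              exact ⟨hglt, hchain.2⟩
      · by_cases h2 : level > flv
        · -- level > levels[-1]
          have hred : pvBStep (roots, (fk, ft, flv, PvNodeList.nil) :: rest) (k, t, level)
              = (roots, ((k, t, level, PvNodeList.nil) : PvFrame) :: (fk, ft, flv, PvNodeList.nil) :: rest) := by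
            simp only [pvBStep]
            rw [pvPopGE_stop roots fk ft flv PvNodeList.nil rest level (by omega)]
          rw [hred]
          refine ⟨?_, ?_, ?_, ?_, ?_⟩
          · simp [pvAStep, pvLv, if_neg h1, if_pos h2]
          · simp only [pvAStep, List.map_cons, pvLv, if_neg h1, if_pos h2]
            apply String.toList_inj.mp
            simp [pvT, pvContrib, pvSib, pvDone, pvJoinAfter, String.toList_append, String.append_assoc]
          · intro f' rest' hf'; cases hf'; rfl
          · simp
          · simp only [List.map_cons, List.isChain_cons_cons, pvLv] at hchain ⊢
            exact ⟨h2, hchain⟩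
        · -- level < levels[-1]: A discards the top silently, then runs the inner loop
          have h3 : level < flv := by omega
          cases rest with
          | nil =>
              have hred : pvBStep (roots, [((fk, ft, flv, PvNodeList.nil) : PvFrame)]) (k, t, level)
                  = (roots.append (.cons (.mk fk ft .nil) .nil), [((k, t, level, PvNodeList.nil) : PvFrame)]) := by
                simp only [pvBStep]
                rw [pvPopGE_pop_last roots fk ft flv PvNodeList.nil level (by omega)]
              rw [hred]
              have hnot : ¬ level > flv := by omega
              refine ⟨?_, ?_, ?_, ?_, ?_⟩
              · simp only [pvAStep, List.map_cons, List.map_nil, pvLv, if_neg h1, if_neg hnot, pvAInner]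
              · simp only [pvAStep, List.map_cons, List.map_nil, pvLv, if_neg h1, if_neg hnot, pvAInner]
                apply String.toList_inj.mp
                simp [pvT, pvContrib, pvSib, pvDone, pvJoinAfter_append_one, pvRenderNode_eq,
                  pvCPend, String.toList_append, String.append_assoc]
              · intro f' rest' hf'; cases hf'; rfl
              · simp
              · simp only [List.map_cons, List.map_nil]
                exact List.IsChain.singleton _
          | cons g gs =>
              obtain ⟨gk, gt, glv, gcs⟩ := g
              have hchain' : List.IsChain (fun a b => b < a)
                  ((((gk, gt, glv, gcs.append (.cons (.mk fk ft .nil) .nil)) : PvFrame) :: gs).map pvLv) := by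
                simp only [List.map_cons, List.isChain_cons_cons, pvLv] at hchain ⊢
                exact hchain.2
              have hd' : pvDone ((gk, gt, glv, gcs.append (.cons (.mk fk ft .nil) .nil)) : PvFrame) ≠ .nil := by
                cases gcs <;> simp [pvDone, PvNodeList.append]
              have hIH := pvLoop gs ((gk, gt, glv, gcs.append (.cons (.mk fk ft .nil) .nil)) : PvFrame)
                roots k t level hd' hchain'
              simp only [List.map_cons, pvLv, pvDone] at hIH
              have harg : ("<ul>\n" ++ pvT roots ((fk, ft, flv, PvNodeList.nil) :: (gk, gt, glv, gcs) :: gs) : String)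
                  = "<ul>\n" ++ pvT roots (((gk, gt, glv, gcs.append (.cons (.mk fk ft .nil) .nil)) : PvFrame) :: gs)
                    ++ "\n<ul>\n" ++ pvRenderList (gcs.append (.cons (.mk fk ft .nil) .nil)) := by
                apply String.toList_inj.mp
                cases gs <;>
                  simp [pvT, pvContrib, pvSib, pvDone, pvRenderList_append_one, pvRenderNode_eq,
                    pvCPend, pvJoinAfter, String.toList_append, String.append_assoc]
              have hredB : pvBStep (roots, (fk, ft, flv, PvNodeList.nil) :: (gk, gt, glv, gcs) :: gs) (k, t, level)
                  = ((pvPopGE roots (((gk, gt, glv, gcs.append (.cons (.mk fk ft .nil) .nil)) : PvFrame) :: gs) level).1,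
                     ((k, t, level, PvNodeList.nil) : PvFrame) ::
                       (pvPopGE roots (((gk, gt, glv, gcs.append (.cons (.mk fk ft .nil) .nil)) : PvFrame) :: gs) level).2) := by
                simp only [pvBStep]
                rw [pvPopGE_pop roots fk ft flv PvNodeList.nil gk gt glv gcs gs level (by omega)]
              rw [hredB]
              have hredA : pvAStep ("<ul>\n" ++ pvT roots ((fk, ft, flv, PvNodeList.nil) :: (gk, gt, glv, gcs) :: gs),
                    ((fk, ft, flv, PvNodeList.nil) :: (gk, gt, glv, gcs) :: gs).map pvLv) (k, t, level)
                  = pvAInner ("<ul>\n" ++ pvT roots (((gk, gt, glv, gcs.append (.cons (.mk fk ft .nil) .nil)) : PvFrame) :: gs)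
                      ++ "\n<ul>\n" ++ pvRenderList (gcs.append (.cons (.mk fk ft .nil) .nil)))
                      ("<a href=\"#" ++ k ++ "\">" ++ t ++ "</a>") level
                      (pvLv ((gk, gt, glv, gcs.append (.cons (.mk fk ft .nil) .nil)) : PvFrame) :: gs.map pvLv) := by
                simp only [pvAStep, List.map_cons, pvLv, if_neg h1, if_neg (by omega : ¬ level > flv)]
                rw [← harg]
              rw [hredA]
              exact ⟨hIH.2.1, hIH.1, by intro f' rest' hf'; cases hf'; rfl, by simp, hIH.2.2⟩

lemma pvCloseLemma (gs : List PvFrame) : ∀ (g : PvFrame) (roots : PvNodeList),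
    pvAClose ("<ul>\n" ++ pvT roots (g :: gs) ++ pvCPend (pvDone g)) ((g :: gs).map pvLv)
      = "<ul>\n" ++ pvRenderList (pvPopAll roots (g :: gs)) ++ "</li>\n</ul>\n" := by
  induction gs with
  | nil =>
      intro g roots
      obtain ⟨gk, gt, glv, gcs⟩ := g
      rw [pvPopAll_last]
      simp only [List.map_cons, List.map_nil, pvAClose, pvDone]
      apply String.toList_inj.mp
      simp [pvT, pvContrib, pvSib, pvRenderList_append_one, pvRenderNode_eq,
        pvJoinAfter, String.toList_append, String.append_assoc]
  | cons h tl ih =>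
      intro g roots
      obtain ⟨gk, gt, glv, gcs⟩ := g
      obtain ⟨hk, ht, hlv, hcs⟩ := h
      rw [pvPopAll_pop]
      simp only [List.map_cons, pvAClose, pvDone]
      have harg : ("<ul>\n" ++ pvT roots ((gk, gt, glv, gcs) :: (hk, ht, hlv, hcs) :: tl) ++ pvCPend gcs
            ++ "</li>\n</ul>\n" : String)
          = "<ul>\n" ++ pvT roots (((hk, ht, hlv, hcs.append (.cons (.mk gk gt gcs) .nil)) : PvFrame) :: tl)
            ++ pvCPend (pvDone ((hk, ht, hlv, hcs.append (.cons (.mk gk gt gcs) .nil)) : PvFrame)) := by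
        apply String.toList_inj.mp
        cases tl <;>
          simp [pvT, pvContrib, pvSib, pvDone, pvCPend_append_one, pvRenderNode_eq,
            String.toList_append, String.append_assoc]
      rw [harg]
      have := ih ((hk, ht, hlv, hcs.append (.cons (.mk gk gt gcs) .nil)) : PvFrame) roots
      simpa [pvLv] using this

lemma pvFoldInv (l : List (String × String × Int)) :
    ∀ (st : String × List Int) (bst : PvNodeList × List PvFrame),
    pvInv st bst.1 bst.2 → pvInv (l.foldl pvAStep st) (l.foldl pvBStep bst).1 (l.foldl pvBStep bst).2 := by
  induction l with
  | nil => intro st bst h; simpa using h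
  | cons e tl ih =>
      intro st bst h
      simpa using ih (pvAStep st e) (pvBStep bst e) (pvStepLemma st bst.1 bst.2 e h)

lemma pvFoldNe (l : List (String × String × Int)) :
    ∀ (bst : PvNodeList × List PvFrame), l ≠ [] → (l.foldl pvBStep bst).2 ≠ [] := by
  induction l with
  | nil => intro bst h; exact absurd rfl h
  | cons e tl ih =>
      intro bst _
      cases htl : tl with
      | nil => simp [pvBStep]
      | cons x xs => simpa [htl] using ih (pvBStep bst e) (by simp [htl])

-- ===== VERDICT (by name: the statement is the Claim_ definition above) =====
theorem render_toc_ul_spec : Claim_equal_render_toc_ul := by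
  intro toc _
  unfold Spec_render_toc_ul render_toc_ul render_toc_ul_alt
  by_cases htoc : toc = []
  · simp [htoc]
  · simp only [if_neg htoc]
    have hInv := pvFoldInv toc ("<ul>\n", ([] : List Int)) (PvNodeList.nil, ([] : List PvFrame))
      (by exact ⟨rfl, by simp [pvT], by simp, by simp, by simp⟩)
    have hne := pvFoldNe toc (PvNodeList.nil, ([] : List PvFrame)) htoc
    set bst := toc.foldl pvBStep (PvNodeList.nil, ([] : List PvFrame)) with hbst
    set st := toc.foldl pvAStep ("<ul>\n", ([] : List Int)) with hst
    obtain ⟨hlv, hs, htop, _, _⟩ := hInv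
    cases hfr : bst.2 with
    | nil => exact absurd hfr hne
    | cons g gs =>
        have hdone : pvDone g = .nil := htop g gs hfr
        have := pvCloseLemma gs g bst.1
        rw [hdone] at this
        simp only [pvCPend] at this
        rw [hs, hlv, hfr]
        rw [show ("<ul>\n" ++ pvT bst.1 (g :: gs) : String)
              = "<ul>\n" ++ pvT bst.1 (g :: gs) ++ "" from (by simp)]
        exact this
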